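-- pv_equiv track=rewrite | github.com/Zdylas/LeetCodeSolutions | Coding Challenge/Python/Question2.py | solution
-- ===== SOURCE A (Python) =====
-- from collections import Counter
--
-- def solution(files):
--     myCounter = Counter()
--     total = 0
--     spare = 0
--     for char in files:
--         myCounter[char] += 1
--         if (myCounter[char] & 1):
--             spare += 1
--         else:
--             total += 2
--             spare -= 1
--     if spare:
--         return total + 1
--     return total
-- ===== SOURCE B (Python) =====
-- from collections import Counter
--
-- def solution(files):
--     cnt = Counter(files)
--     total = 0
--     for c in cnt.values():
--         total += (c // 2) * 2
--     odd = any(c % 2 for c in cnt.values())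
--     return total + 1 if odd else total
-- ===== Notes on version B (the rewrite author's own statement) =====
-- stated objective: simpler
-- what changed: A interleaves per-character increment with parity tracking of total/spare in one Python-level loop; B builds the full Counter first (C-level) and then reduces over the distinct counts only, summing (c // 2) * 2 and checking any(c % 2).
import Mathlib
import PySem

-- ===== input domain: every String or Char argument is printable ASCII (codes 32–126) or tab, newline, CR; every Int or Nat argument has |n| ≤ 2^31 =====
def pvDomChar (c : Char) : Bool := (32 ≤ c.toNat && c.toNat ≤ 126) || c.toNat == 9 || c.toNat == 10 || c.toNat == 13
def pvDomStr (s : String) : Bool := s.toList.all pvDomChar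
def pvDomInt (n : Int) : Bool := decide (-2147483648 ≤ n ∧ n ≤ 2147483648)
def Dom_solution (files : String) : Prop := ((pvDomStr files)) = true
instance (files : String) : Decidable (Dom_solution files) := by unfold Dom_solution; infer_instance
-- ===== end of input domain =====

-- B replaces A's interleaved per-character parity/spare tracking with a two-phase
-- count-then-reduce over the distinct character counts (objective: simpler).

-- ===== PORT A =====
-- A: one pass; increments a Counter and updates total/spare from the new count's parity.
def solution (files : String) : Int :=
  let st := files.toList.foldl
    (fun (st : PySem.Dict Char Int × Int × Int) char =>
      let d := st.1.modify char 0 (· + 1)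
      let v := d.getD char 0
      if PySem.Int.band v 1 ≠ 0 then (d, st.2.1, st.2.2 + 1)
      else (d, st.2.1 + 2, st.2.2 - 1))
    (PySem.Dict.empty, 0, 0)
  if st.2.2 ≠ 0 then st.2.1 + 1 else st.2.1

-- ===== PORT B =====
-- B: build the full Counter first, then sum pair contributions (c // 2) * 2 over its
-- values and check whether any count is odd.
def solution_alt (files : String) : Int :=
  let cnt := PySem.Dict.counter files.toList
  let total := cnt.values.foldl (fun t c => t + PySem.Int.floordiv c 2 * 2) 0
  let odd := cnt.values.any (fun c => PySem.Int.mod c 2 ≠ 0)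
  if odd then total + 1 else total

-- ===== PRECONDITION & SPEC =====
def Spec_solution (files : String) (out : Int) : Prop := out = solution_alt files
instance (files : String) (out : Int) : Decidable (Spec_solution files out) := by unfold Spec_solution; infer_instance

-- ===== CLAIM (what is proved, stated in full; the proofs are below) =====
def Claim_equal_solution : Prop := ∀ (files : String), Dom_solution files → Spec_solution files (solution files)

-- ===== LEMMAS AND PROOFS =====

-- total after processing prefix p in A's loop: pair contributions of the distinct chars
def pvTot (p : List Char) : Int :=
  ((PySem.Set.ofList p).map (fun k => ((p.count k / 2 : Nat) : Int) * 2)).sum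

-- spare after processing prefix p: number of distinct chars with odd count (as 0/1-sum)
def pvSp (p : List Char) : Int :=
  ((PySem.Set.ofList p).map (fun k => if p.count k % 2 = 1 then (1 : Int) else 0)).sum

-- sum over a Nodup list of a function changed at exactly one member
theorem pv_sum_update {S : List Char} (hnd : S.Nodup) {c : Char} (hc : c ∈ S)
    (f g : Char → Int) (h : ∀ k ∈ S, k ≠ c → f k = g k) :
    (S.map g).sum = (S.map f).sum - f c + g c := by
  induction S with
  | nil => cases hc
  | cons a S ih =>
    rcases List.mem_cons.mp hc with rfl | hc'
    · have : ∀ k ∈ S, f k = g k := by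
        intro k hk
        exact h k (List.mem_cons_of_mem _ hk) (fun hkc => (List.nodup_cons.mp hnd).1 (hkc ▸ hk))
      simp [List.map_congr_left this]
      ring
    · have hac : a ≠ c := fun hac => (List.nodup_cons.mp hnd).1 (hac ▸ hc')
      have := ih (List.nodup_cons.mp hnd).2 hc'
        (fun k hk hkc => h k (List.mem_cons_of_mem _ hk) hkc)
      simp [this, h a (List.mem_cons_self ..) hac]
      ring

theorem pv_count_append (p : List Char) (c k : Char) :
    (p ++ [c]).count k = p.count k + (if k = c then 1 else 0) := by
  by_cases h : k = c
  · subst h; simp [List.count_append]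
  · simp [List.count_append, h]
    exact List.count_eq_zero.mpr (by simp [h])

theorem pv_tot_append (p : List Char) (c : Char) :
    pvTot (p ++ [c]) = if (p.count c + 1) % 2 = 1 then pvTot p else pvTot p + 2 := by
  unfold pvTot
  rw [PySem.Set.ofList_append_singleton]
  by_cases hc : c ∈ p
  · have hcc : List.count c (p ++ [c]) = List.count c p + 1 := by
      simp
    rw [PySem.Set.add_of_mem ((PySem.Set.mem_ofList _ _).mpr hc)]
    rw [pv_sum_update (PySem.Set.nodup_ofList p) ((PySem.Set.mem_ofList _ _).mpr hc)
        (fun k => ((p.count k / 2 : Nat) : Int) * 2)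
        (fun k => (((p ++ [c]).count k / 2 : Nat) : Int) * 2)
        (fun k _ hkc => by
          have h := pv_count_append p c k
          rw [if_neg hkc, Nat.add_zero] at h
          simp [h])]
    simp only [hcc]
    by_cases hpar : (p.count c + 1) % 2 = 1
    · rw [if_pos hpar]; omega
    · rw [if_neg hpar]; omega
  · have h0 : p.count c = 0 := List.count_eq_zero.mpr hc
    have hcc : List.count c (p ++ [c]) = 1 := by
      simp [h0]
    rw [PySem.Set.add_of_not_mem (fun h => hc ((PySem.Set.mem_ofList _ _).mp h))]
    rw [List.map_append, List.sum_append]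
    have h1 : (PySem.Set.ofList p).map (fun k => (((p ++ [c]).count k / 2 : Nat) : Int) * 2)
        = (PySem.Set.ofList p).map (fun k => ((p.count k / 2 : Nat) : Int) * 2) := by
      refine List.map_congr_left (fun k hk => ?_)
      have hkc : k ≠ c := fun e => hc (e ▸ (PySem.Set.mem_ofList _ _).mp hk)
      have h := pv_count_append p c k
      rw [if_neg hkc, Nat.add_zero] at h
      simp [h]
    rw [h1]
    simp [h0]

theorem pv_sp_append (p : List Char) (c : Char) :
    pvSp (p ++ [c]) = if (p.count c + 1) % 2 = 1 then pvSp p + 1 else pvSp p - 1 := by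
  unfold pvSp
  rw [PySem.Set.ofList_append_singleton]
  by_cases hc : c ∈ p
  · have hcc : List.count c (p ++ [c]) = List.count c p + 1 := by
      simp
    rw [PySem.Set.add_of_mem ((PySem.Set.mem_ofList _ _).mpr hc)]
    rw [pv_sum_update (PySem.Set.nodup_ofList p) ((PySem.Set.mem_ofList _ _).mpr hc)
        (fun k => if p.count k % 2 = 1 then (1 : Int) else 0)
        (fun k => if (p ++ [c]).count k % 2 = 1 then (1 : Int) else 0)
        (fun k _ hkc => by
          have h := pv_count_append p c k
          rw [if_neg hkc, Nat.add_zero] at h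
          simp [h])]
    simp only [hcc]
    by_cases hpar : (p.count c + 1) % 2 = 1
    · have h0 : ¬ p.count c % 2 = 1 := by omega
      rw [if_pos hpar, if_neg h0, if_pos hpar]; ring
    · have h0 : p.count c % 2 = 1 := by omega
      rw [if_neg hpar, if_pos h0, if_neg hpar]; ring
  · have h0 : p.count c = 0 := List.count_eq_zero.mpr hc
    have hcc : List.count c (p ++ [c]) = 1 := by
      simp [h0]
    rw [PySem.Set.add_of_not_mem (fun h => hc ((PySem.Set.mem_ofList _ _).mp h))]
    rw [List.map_append, List.sum_append]
    have h1 : (PySem.Set.ofList p).map (fun k => if (p ++ [c]).count k % 2 = 1 then (1 : Int) else 0)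
        = (PySem.Set.ofList p).map (fun k => if p.count k % 2 = 1 then (1 : Int) else 0) := by
      refine List.map_congr_left (fun k hk => ?_)
      have hkc : k ≠ c := fun e => hc (e ▸ (PySem.Set.mem_ofList _ _).mp hk)
      have h := pv_count_append p c k
      rw [if_neg hkc, Nat.add_zero] at h
      simp [h]
    rw [h1]
    simp [h0]

-- A's loop invariant
theorem pv_loopA (l p : List Char) :
    l.foldl
      (fun (st : PySem.Dict Char Int × Int × Int) char =>
        let d := st.1.modify char 0 (· + 1)
        let v := d.getD char 0
        if PySem.Int.band v 1 ≠ 0 then (d, st.2.1, st.2.2 + 1)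
        else (d, st.2.1 + 2, st.2.2 - 1))
      (PySem.Dict.counter p, pvTot p, pvSp p)
    = (PySem.Dict.counter (p ++ l), pvTot (p ++ l), pvSp (p ++ l)) := by
  induction l generalizing p with
  | nil => simp
  | cons c l ih =>
    rw [List.foldl_cons]
    have hstep : (if PySem.Int.band (((PySem.Dict.counter p).modify c 0 (· + 1)).getD c 0) 1 ≠ 0
          then ((PySem.Dict.counter p).modify c 0 (· + 1), pvTot p, pvSp p + 1)
          else ((PySem.Dict.counter p).modify c 0 (· + 1), pvTot p + 2, pvSp p - 1))
        = (PySem.Dict.counter (p ++ [c]), pvTot (p ++ [c]), pvSp (p ++ [c])) := by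
      rw [← PySem.Dict.counter_append_singleton, PySem.Dict.getD_counter]
      have hcc : (p ++ [c]).count c = p.count c + 1 := by rw [pv_count_append]; simp
      rw [hcc]
      have hband : PySem.Int.band ((p.count c + 1 : Nat) : Int) 1
          = (((p.count c + 1) % 2 : Nat) : Int) := by
        rw [PySem.Int.band_one]
        exact_mod_cast PySem.Int.mod_natCast (p.count c + 1) 2
      push_cast at hband ⊢
      rw [hband, pv_tot_append, pv_sp_append]
      by_cases hpar : (p.count c + 1) % 2 = 1
      · have hcond : ((List.count c p : Int) + 1) % 2 ≠ 0 := by omega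
        simp [hpar, hcond]
      · have hcond : ¬ ((List.count c p : Int) + 1) % 2 ≠ 0 := by omega
        simp [hpar, hcond]
    rw [show (p ++ c :: l) = ((p ++ [c]) ++ l) by simp, ← ih (p ++ [c])]
    exact congrArg (fun st => List.foldl (fun (st : PySem.Dict Char Int × Int × Int) char =>
      let d := st.1.modify char 0 (· + 1)
      let v := d.getD char 0
      if PySem.Int.band v 1 ≠ 0 then (d, st.2.1, st.2.2 + 1)
      else (d, st.2.1 + 2, st.2.2 - 1)) st l) hstep

theorem pv_values_counter (l : List Char) :
    (PySem.Dict.counter l).values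
      = (PySem.Set.ofList l).map (fun k => ((l.count k : Nat) : Int)) := by
  simp only [PySem.Dict.values, PySem.Dict.items_counter, List.map_map]
  rfl

-- ===== VERDICT (by name: the statement is the Claim_ definition above) =====
-- a 0/1-indicator sum is nonzero iff some member satisfies the predicate
theorem pv_indicator_sum_ne (S : List Char) (q : Char → Prop) [DecidablePred q] :
    (S.map (fun k => if q k then (1 : Int) else 0)).sum ≠ 0 ↔ ∃ k ∈ S, q k := by
  induction S with
  | nil => simp
  | cons a S ih =>
    have hnn : 0 ≤ (S.map (fun k => if q k then (1 : Int) else 0)).sum := by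
      refine List.sum_nonneg (fun x hx => ?_)
      rcases List.mem_map.mp hx with ⟨k, _, rfl⟩
      split <;> omega
    by_cases hq : q a
    · simp [hq]
      omega
    · simp [hq, ih]

theorem solution_spec : Claim_equal_solution := by
  intro files _
  unfold Spec_solution solution solution_alt
  have hl := pv_loopA files.toList []
  simp only [List.nil_append] at hl
  have h0 : (PySem.Dict.counter ([] : List Char), pvTot [], pvSp [])
      = ((PySem.Dict.empty : PySem.Dict Char Int), (0 : Int), (0 : Int)) := rfl
  rw [h0] at hl
  rw [hl]
  have hBt : (PySem.Dict.counter files.toList).values.foldl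
      (fun t c => t + PySem.Int.floordiv c 2 * 2) 0 = pvTot files.toList := by
    rw [PySem.List.foldl_add, pv_values_counter, List.map_map]
    unfold pvTot
    rw [zero_add]
    congr 1
    refine List.map_congr_left (fun k _ => ?_)
    show PySem.Int.floordiv ((files.toList.count k : Nat) : Int) 2 * 2 = _
    have : PySem.Int.floordiv ((files.toList.count k : Nat) : Int) 2
        = ((files.toList.count k / 2 : Nat) : Int) := by
      exact_mod_cast PySem.Int.floordiv_natCast (files.toList.count k) 2
    rw [this]
  have hodd : ((PySem.Dict.counter files.toList).values.any
        (fun c => PySem.Int.mod c 2 ≠ 0) = true)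
      ↔ pvSp files.toList ≠ 0 := by
    rw [pv_values_counter, List.any_map]
    unfold pvSp
    rw [pv_indicator_sum_ne]
    simp only [List.any_eq_true, Function.comp]
    constructor
    · rintro ⟨k, hk, hdk⟩
      refine ⟨k, hk, ?_⟩
      have hmod : PySem.Int.mod ((files.toList.count k : Nat) : Int) 2
          = (((files.toList.count k) % 2 : Nat) : Int) := by
        exact_mod_cast PySem.Int.mod_natCast (files.toList.count k) 2
      rw [hmod] at hdk
      simp at hdk
      omega
    · rintro ⟨k, hk, hdk⟩
      refine ⟨k, hk, ?_⟩
      have hmod : PySem.Int.mod ((files.toList.count k : Nat) : Int) 2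
          = (((files.toList.count k) % 2 : Nat) : Int) := by
        exact_mod_cast PySem.Int.mod_natCast (files.toList.count k) 2
      rw [hmod]
      simp
      omega
  simp only [hBt]
  by_cases hsp : pvSp files.toList ≠ 0
  · rw [if_pos hsp, if_pos (hodd.mpr hsp)]
  · rw [if_neg hsp, if_neg (fun h => hsp (hodd.mp h))]
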